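-- pv_equiv track=rewrite | github.com/BenMabroukAya/Crypto | cryptAffine.py | formater
-- ===== SOURCE A (Python) =====
-- def formater (text,chiff=1):
-- 	if chiff==1:
-- 		text=text.upper()
-- 	else:
-- 		text=text.lower()
-- 	chaine=""
-- 	for i in range(len(text)):
-- 		if i%5==0 and i!=0:
-- 			chaine+=" "
-- 		chaine+=text[i]
-- 	return chaine
-- ===== SOURCE B (Python) =====
-- def formater(text, chiff=1):
--     text = text.upper() if chiff == 1 else text.lower()
--     return " ".join(text[i:i+5] for i in range(0, len(text), 5))
-- ===== Notes on version B (the rewrite author's own statement) =====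
-- stated objective: faster
-- what changed: Replaces the per-character loop that appends to a string under a running index with a modulo space test by slicing the case-transformed text into 5-character blocks over range(0, len, 5) and joining them with a single space.
import Mathlib
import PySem

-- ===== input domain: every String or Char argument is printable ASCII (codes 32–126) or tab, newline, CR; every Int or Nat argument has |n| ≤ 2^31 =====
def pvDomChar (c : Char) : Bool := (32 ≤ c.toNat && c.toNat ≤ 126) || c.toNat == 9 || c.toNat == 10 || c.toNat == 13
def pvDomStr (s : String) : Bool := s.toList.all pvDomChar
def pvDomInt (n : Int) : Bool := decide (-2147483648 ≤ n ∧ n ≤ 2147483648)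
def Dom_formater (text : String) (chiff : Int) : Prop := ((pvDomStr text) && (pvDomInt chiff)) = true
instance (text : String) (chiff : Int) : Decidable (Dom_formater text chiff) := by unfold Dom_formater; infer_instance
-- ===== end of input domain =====

-- B groups the case-transformed text into 5-character blocks by slicing over range(0, len, 5)
-- and joining with a single space, instead of A's per-character string-append loop with a modulo space test (measured faster).

-- ===== PORT A =====
def formater (text : String) (chiff : Int) : String :=
  let t : List Char := if chiff == 1 then PySem.Chars.upper text.toList else PySem.Chars.lower text.toList
  String.ofList ((PySem.List.pyRange 0 (PySem.List.len t) 1).foldl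
    (fun chaine i =>
      (if PySem.Int.mod i 5 == 0 && !(i == 0) then chaine ++ [' '] else chaine)
        ++ [PySem.List.pyGetD t i ' '])
    [])

-- ===== PORT B =====
def formater_alt (text : String) (chiff : Int) : String :=
  let t : List Char := if chiff == 1 then PySem.Chars.upper text.toList else PySem.Chars.lower text.toList
  String.ofList (PySem.Chars.join [' ']
    ((PySem.List.pyRange 0 (PySem.List.len t) 5).map
      (fun i => PySem.List.slice t (some i) (some (i + 5)))))

-- ===== PRECONDITION & SPEC =====
def Spec_formater (text : String) (chiff : Int) (out : String) : Prop := out = formater_alt text chiff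
instance (text : String) (chiff : Int) (out : String) : Decidable (Spec_formater text chiff out) := by unfold Spec_formater; infer_instance

-- ===== CLAIM (what is proved, stated in full; the proofs are below) =====
def Claim_equal_formater : Prop := ∀ (text : String) (chiff : Int), Dom_formater text chiff → Spec_formater text chiff (formater text chiff)

-- ===== LEMMAS AND PROOFS =====

-- canonical per-character recursion: char at position p is preceded by ' ' iff p % 5 = 0 and p ≠ 0
def spacedFrom : List Char → Nat → List Char
  | [], _ => []
  | c :: t, p => (if p % 5 = 0 ∧ p ≠ 0 then [' '] else []) ++ c :: spacedFrom t (p + 1)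

-- consecutive 5-blocks of a list
def myChunks : List Char → List (List Char)
  | [] => []
  | c :: t => ((c :: t).take 5) :: myChunks ((c :: t).drop 5)
  termination_by l => l.length
  decreasing_by simp

def spaceJoin (l : List Char) : List Char :=
  if l = [] then [] else ' ' :: PySem.Chars.join [' '] (myChunks l)







lemma chunks_ne_nil (l : List Char) (h : l ≠ []) : myChunks l ≠ [] := by
  cases l with
  | nil => exact absurd rfl h
  | cons c t => rw [myChunks]; simp

lemma join_cons (x : List Char) (r : List (List Char)) (h : r ≠ []) :
    PySem.Chars.join [' '] (x :: r) = x ++ ' ' :: PySem.Chars.join [' '] r := by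
  obtain ⟨y, r, rfl⟩ := List.exists_cons_of_ne_nil h
  simp [PySem.Chars.join, List.intercalate]

lemma join_chunks (l : List Char) (h : l ≠ []) :
    PySem.Chars.join [' '] (myChunks l) = l.take 5 ++ spaceJoin (l.drop 5) := by
  obtain ⟨c, t, rfl⟩ := List.exists_cons_of_ne_nil h
  rw [myChunks]
  by_cases hd : (c :: t).drop 5 = []
  · rw [hd]; simp [myChunks, spaceJoin, PySem.Chars.join, List.intercalate]
  · rw [join_cons _ _ (chunks_ne_nil _ hd), spaceJoin, if_neg hd]

lemma spaced_split (n : Nat) : ∀ l : List Char, l.length ≤ n →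
    (∀ p : Nat, p % 5 = 0 → p ≠ 0 → spacedFrom l p = spaceJoin l) ∧
    (∀ p r : Nat, p % 5 = r → 0 < r → r < 5 →
      spacedFrom l p = l.take (5 - r) ++ spaceJoin (l.drop (5 - r))) := by
  induction n with
  | zero =>
    intro l hl
    have : l = [] := List.eq_nil_of_length_eq_zero (Nat.le_zero.mp hl)
    subst this
    constructor
    · intro p _ _; simp [spacedFrom, spaceJoin]
    · intro p r _ _ _; simp [spacedFrom, spaceJoin]
  | succ n ih =>
    intro l hl
    cases l with
    | nil =>
      constructor
      · intro p _ _; simp [spacedFrom, spaceJoin]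
      · intro p r _ _ _; simp [spacedFrom, spaceJoin]
    | cons c t =>
      have ht : t.length ≤ n := by simpa using hl
      constructor
      · intro p hp hp0
        rw [spacedFrom, if_pos ⟨hp, hp0⟩]
        have h1 : (p + 1) % 5 = 1 := by omega
        rw [(ih t ht).2 (p + 1) 1 h1 (by omega) (by omega)]
        rw [show spaceJoin (c :: t) = ' ' :: PySem.Chars.join [' '] (myChunks (c :: t)) from by
          rw [spaceJoin, if_neg (by simp)]]
        rw [join_chunks (c :: t) (by simp)]
        simp
      · intro p r hp hr hr5
        rw [spacedFrom, if_neg (by omega)]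
        rcases Nat.lt_or_ge r 4 with h4 | h4
        · have h1 : (p + 1) % 5 = r + 1 := by omega
          rw [(ih t ht).2 (p + 1) (r + 1) h1 (by omega) (by omega)]
          have e1 : (5 - r) = (5 - (r + 1)) + 1 := by omega
          have e2 : (c :: t).take (5 - r) = c :: t.take (5 - (r + 1)) := by
            rw [e1]; simp
          have e3 : (c :: t).drop (5 - r) = t.drop (5 - (r + 1)) := by
            rw [e1]; simp
          rw [e2, e3]; simp
        · have hr4 : r = 4 := by omega
          subst hr4
          have h1 : (p + 1) % 5 = 0 := by omega
          rw [(ih t ht).1 (p + 1) h1 (by omega)]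
          simp

lemma spaced_eq_join (l : List Char) :
    spacedFrom l 0 = PySem.Chars.join [' '] (myChunks l) := by
  cases l with
  | nil => simp [spacedFrom, myChunks, PySem.Chars.join, List.intercalate]
  | cons c t =>
    rw [spacedFrom, if_neg (by omega)]
    rw [(spaced_split t.length t le_rfl).2 1 1 (by omega) (by omega) (by omega)]
    rw [join_chunks (c :: t) (by simp)]
    simp

lemma foldlA (l : List Char) : ∀ (s : Nat) (acc : List Char),
    (PySem.List.enumerate l (s : Int)).foldl
      (fun chaine x =>
        (if PySem.Int.mod x.1 5 == 0 && !(x.1 == 0) then chaine ++ [' '] else chaine) ++ [x.2])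
      acc = acc ++ spacedFrom l s := by
  induction l with
  | nil => intro s acc; simp [PySem.List.enumerate_nil, spacedFrom]
  | cons c t ih =>
    intro s acc
    rw [PySem.List.enumerate_cons, List.foldl_cons]
    have hcast : (s : Int) + 1 = ((s + 1 : Nat) : Int) := by push_cast; ring
    rw [hcast, ih (s + 1)]
    have hcond : (PySem.Int.mod (s : Int) 5 == 0 && !((s : Int) == 0))
        = decide (s % 5 = 0 ∧ s ≠ 0) := by
      have : PySem.Int.mod (s : Int) 5 = ((s % 5 : Nat) : Int) := by
        exact_mod_cast PySem.Int.mod_natCast s 5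
      rw [this]
      by_cases h1 : s % 5 = 0 <;> by_cases h2 : s = 0 <;> (simp [h1, h2]; try omega)
    rw [hcond, spacedFrom]
    by_cases h : s % 5 = 0 ∧ s ≠ 0 <;> simp [h]

lemma mapslice (m : Nat) : ∀ l : List Char, l.length ≤ 5 * m → 5 * m < l.length + 5 →
    (List.range m).map (fun k => (l.drop (5 * k)).take 5) = myChunks l := by
  induction m with
  | zero =>
    intro l h1 _
    have hnil : l = [] := List.eq_nil_of_length_eq_zero (by omega)
    subst hnil; simp [myChunks]
  | succ m ih =>
    intro l h1 h2
    have hl : l ≠ [] := by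
      rintro rfl; simp at h2
    obtain ⟨c, t, rfl⟩ := List.exists_cons_of_ne_nil hl
    rw [myChunks, List.range_succ_eq_map, List.map_cons, List.map_map]
    have e : ((fun k => ((c :: t).drop (5 * k)).take 5) ∘ Nat.succ)
        = fun k => (((c :: t).drop 5).drop (5 * k)).take 5 := by
      funext k
      simp only [Function.comp, List.drop_drop]
      congr 2
      omega
    have hb1 : ((c :: t).drop 5).length ≤ 5 * m := by simp at h1 ⊢; omega
    have hb2 : 5 * m < ((c :: t).drop 5).length + 5 := by simp at h1 h2 ⊢; omega
    rw [e, ih _ hb1 hb2]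
    congr 1

lemma slice_block (t : List Char) (k : Nat) :
    PySem.List.slice t (some (0 + 5 * (k : Int))) (some (0 + 5 * (k : Int) + 5))
      = (t.drop (5 * k)).take 5 := by
  rw [PySem.List.slice_toNat t (by positivity) (by positivity)]
  congr 1
  · omega
  · congr 1; omega

lemma core (t : List Char) :
    (PySem.List.pyRange 0 (PySem.List.len t) 1).foldl
      (fun chaine i =>
        (if PySem.Int.mod i 5 == 0 && !(i == 0) then chaine ++ [' '] else chaine)
          ++ [PySem.List.pyGetD t i ' '])
      []
    = PySem.Chars.join [' ']
        ((PySem.List.pyRange 0 (PySem.List.len t) 5).map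
          (fun i => PySem.List.slice t (some i) (some (i + 5)))) := by
  have hL : (PySem.List.pyRange 0 (PySem.List.len t) 1).foldl
      (fun chaine i =>
        (if PySem.Int.mod i 5 == 0 && !(i == 0) then chaine ++ [' '] else chaine)
          ++ [PySem.List.pyGetD t i ' '])
      [] = spacedFrom t 0 := by
    have h := foldlA t 0 []
    rw [Nat.cast_zero] at h
    rw [PySem.List.enumerate_eq_map_pyRange t ' ', List.foldl_map] at h
    simpa using h
  rw [hL, spaced_eq_join]
  congr 1
  rw [PySem.List.pyRange_of_pos 0 (PySem.List.len t) (by norm_num), List.map_map]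
  have he : ((fun i => PySem.List.slice t (some i) (some (i + 5))) ∘ fun k : Nat => (0 : Int) + 5 * (k : Int))
      = fun k : Nat => (t.drop (5 * k)).take 5 := by
    funext k
    exact slice_block t k
  rw [he]
  by_cases h0 : t.length = 0
  · have : t = [] := List.eq_nil_of_length_eq_zero h0
    subst this
    simp [PySem.List.len, myChunks]
  · have hlen : PySem.List.len t = (t.length : Int) := by simp [PySem.List.len]
    have hpos : (0 : Int) < PySem.List.len t := by rw [hlen]; exact_mod_cast Nat.pos_of_ne_zero h0
    rw [if_pos hpos]
    have hM : ((PySem.List.len t - 0 + 5 - 1) / 5).toNat = (t.length + 4) / 5 := by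
      rw [hlen]
      have : ((t.length : Int) - 0 + 5 - 1) = ((t.length + 4 : Nat) : Int) := by push_cast; ring
      rw [this, show (5 : Int) = ((5 : Nat) : Int) from rfl, ← Int.natCast_div, Int.toNat_natCast]
    rw [hM]
    exact (mapslice ((t.length + 4) / 5) t (by omega) (by omega)).symm

-- ===== VERDICT (by name: the statement is the Claim_ definition above) =====
theorem formater_spec : Claim_equal_formater := by
  intro text chiff _
  unfold Spec_formater formater formater_alt
  exact congrArg String.ofList (core _)
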